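-- pv_equiv track=rewrite | github.com/kitisathreat/local-ai-stack | tools/free_games.py | _detect_blockers
-- ===== SOURCE A (Python) =====
-- def _detect_blockers(html: str, headers: dict) -> str:
--     """Surface obvious anti-bot signatures so the user knows when to give
--     up on a regex fix and reach for a headless browser instead."""
--     hits: list[str] = []
--     h = (html or "")[:5000].lower()
--     srv = (headers.get("server") or "").lower()
--     if "cloudflare" in srv or "cf-ray" in {k.lower() for k in headers}:
--         hits.append("Cloudflare (likely JS challenge / Turnstile)")
--     if "just a moment" in h or "checking your browser" in h:
--         hits.append("Cloudflare interstitial detected in body")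
--     if "captcha" in h or "g-recaptcha" in h or "h-captcha" in h:
--         hits.append("CAPTCHA challenge")
--     if "ddos-guard" in srv or "ddos-guard" in h:
--         hits.append("DDoS-Guard")
--     if "incapsula" in h or "imperva" in srv:
--         hits.append("Imperva / Incapsula")
--     if "<script" in h and ("__nuxt__" in h or "__next_data__" in h or "ng-version" in h or "react-root" in h):
--         hits.append("JS-rendered SPA — server returned shell HTML, real content loads via JS")
--     if not h.strip():
--         hits.append("empty response body")
--     return "; ".join(hits)
-- ===== SOURCE B (Python) =====
-- # Two-stage signal engine: stage 1 scans needle tables and collects tagged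
-- # signals into a set; stage 2 evaluates generic (required, any, message)
-- # rules against that set with subset / disjointness tests.
--
-- _SRV_PROBES = [
--     ("cloudflare", "srv:cloudflare"),
--     ("ddos-guard", "srv:ddos-guard"),
--     ("imperva", "srv:imperva"),
-- ]
--
-- _BODY_PROBES = [
--     ("just a moment", "h:just a moment"),
--     ("checking your browser", "h:checking your browser"),
--     ("captcha", "h:captcha"),
--     ("g-recaptcha", "h:g-recaptcha"),
--     ("h-captcha", "h:h-captcha"),
--     ("ddos-guard", "h:ddos-guard"),
--     ("incapsula", "h:incapsula"),
--     ("<script", "h:<script"),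
--     ("__nuxt__", "h:__nuxt__"),
--     ("__next_data__", "h:__next_data__"),
--     ("ng-version", "h:ng-version"),
--     ("react-root", "h:react-root"),
-- ]
--
-- _RULES = [
--     (set(), {"srv:cloudflare", "hdr:cf-ray"},
--      "Cloudflare (likely JS challenge / Turnstile)"),
--     (set(), {"h:just a moment", "h:checking your browser"},
--      "Cloudflare interstitial detected in body"),
--     (set(), {"h:captcha", "h:g-recaptcha", "h:h-captcha"},
--      "CAPTCHA challenge"),
--     (set(), {"srv:ddos-guard", "h:ddos-guard"},
--      "DDoS-Guard"),
--     (set(), {"h:incapsula", "srv:imperva"},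
--      "Imperva / Incapsula"),
--     ({"h:<script"}, {"h:__nuxt__", "h:__next_data__", "h:ng-version", "h:react-root"},
--      "JS-rendered SPA — server returned shell HTML, real content loads via JS"),
--     ({"empty"}, set(),
--      "empty response body"),
-- ]
--
--
-- def _signals(h, srv, headers):
--     found = set()
--     for needle, tag in _SRV_PROBES:
--         if needle in srv:
--             found.add(tag)
--     for needle, tag in _BODY_PROBES:
--         if needle in h:
--             found.add(tag)
--     if "cf-ray" in {k.lower() for k in headers}:
--         found.add("hdr:cf-ray")
--     if not h.strip():
--         found.add("empty")
--     return found
--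
--
-- def _detect_blockers(html: str, headers: dict) -> str:
--     h = (html or "")[:5000].lower()
--     srv = (headers.get("server") or "").lower()
--     found = _signals(h, srv, headers)
--     hits = [msg for req, opt, msg in _RULES
--             if req <= found and (not opt or not opt.isdisjoint(found))]
--     return "; ".join(hits)
-- ===== Notes on version B (the rewrite author's own statement) =====
-- stated objective: alternative
-- what changed: Replaces A's hard-coded chain of boolean branches by a two-stage signal engine: stage 1 scans needle tables once and collects tagged signals into a set, stage 2 evaluates data-driven (required, any, message) rules against that set via subset/disjointness tests and joins the messages.
import Mathlib
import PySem

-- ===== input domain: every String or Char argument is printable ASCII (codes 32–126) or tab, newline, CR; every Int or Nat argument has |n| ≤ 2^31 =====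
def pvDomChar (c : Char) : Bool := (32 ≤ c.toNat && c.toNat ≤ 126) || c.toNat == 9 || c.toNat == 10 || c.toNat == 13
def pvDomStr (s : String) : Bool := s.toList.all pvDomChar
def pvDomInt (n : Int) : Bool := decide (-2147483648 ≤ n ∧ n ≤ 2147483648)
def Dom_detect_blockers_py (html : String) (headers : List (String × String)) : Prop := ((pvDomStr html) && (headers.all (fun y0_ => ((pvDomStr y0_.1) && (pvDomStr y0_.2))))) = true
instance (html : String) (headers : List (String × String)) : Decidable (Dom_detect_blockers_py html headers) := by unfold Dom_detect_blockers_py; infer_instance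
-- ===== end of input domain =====

-- B replaces A's hard-coded boolean branch chain by a two-stage signal engine
-- (needle tables -> tagged signal set -> data-driven (required, any, message) rules); objective: alternative.

-- ===== PORT A =====
def detect_blockers_py (html : String) (headers : List (String × String)) : String :=
  let h := PySem.Str.lower (PySem.Str.slice html none (some 5000))
  let srv := PySem.Str.lower ((List.lookup "server" headers).getD "")
  let hits : List String := []
  let hits := if PySem.Str.isIn "cloudflare" srv
      || PySem.Set.contains (PySem.Set.ofList (headers.map (fun kv => PySem.Str.lower kv.1))) "cf-ray" then
    hits ++ ["Cloudflare (likely JS challenge / Turnstile)"] else hits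
  let hits := if PySem.Str.isIn "just a moment" h || PySem.Str.isIn "checking your browser" h then
    hits ++ ["Cloudflare interstitial detected in body"] else hits
  let hits := if PySem.Str.isIn "captcha" h || PySem.Str.isIn "g-recaptcha" h || PySem.Str.isIn "h-captcha" h then
    hits ++ ["CAPTCHA challenge"] else hits
  let hits := if PySem.Str.isIn "ddos-guard" srv || PySem.Str.isIn "ddos-guard" h then
    hits ++ ["DDoS-Guard"] else hits
  let hits := if PySem.Str.isIn "incapsula" h || PySem.Str.isIn "imperva" srv then
    hits ++ ["Imperva / Incapsula"] else hits
  let hits := if PySem.Str.isIn "<script" h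
      && (PySem.Str.isIn "__nuxt__" h || PySem.Str.isIn "__next_data__" h
          || PySem.Str.isIn "ng-version" h || PySem.Str.isIn "react-root" h) then
    hits ++ ["JS-rendered SPA — server returned shell HTML, real content loads via JS"] else hits
  let hits := if PySem.Str.len (PySem.Str.strip h) == 0 then
    hits ++ ["empty response body"] else hits
  PySem.Str.join "; " hits

-- ===== PORT B =====
-- Source B's module-level needle tables and rules, as literal data.
def pvSrvProbes : List (String × String) :=
  [("cloudflare", "srv:cloudflare"), ("ddos-guard", "srv:ddos-guard"), ("imperva", "srv:imperva")]

def pvBodyProbes : List (String × String) :=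
  [("just a moment", "h:just a moment"),
   ("checking your browser", "h:checking your browser"),
   ("captcha", "h:captcha"),
   ("g-recaptcha", "h:g-recaptcha"),
   ("h-captcha", "h:h-captcha"),
   ("ddos-guard", "h:ddos-guard"),
   ("incapsula", "h:incapsula"),
   ("<script", "h:<script"),
   ("__nuxt__", "h:__nuxt__"),
   ("__next_data__", "h:__next_data__"),
   ("ng-version", "h:ng-version"),
   ("react-root", "h:react-root")]

def pvRules : List (PySem.Set String × PySem.Set String × String) :=
  [(PySem.Set.ofList [], PySem.Set.ofList ["srv:cloudflare", "hdr:cf-ray"],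
    "Cloudflare (likely JS challenge / Turnstile)"),
   (PySem.Set.ofList [], PySem.Set.ofList ["h:just a moment", "h:checking your browser"],
    "Cloudflare interstitial detected in body"),
   (PySem.Set.ofList [], PySem.Set.ofList ["h:captcha", "h:g-recaptcha", "h:h-captcha"],
    "CAPTCHA challenge"),
   (PySem.Set.ofList [], PySem.Set.ofList ["srv:ddos-guard", "h:ddos-guard"],
    "DDoS-Guard"),
   (PySem.Set.ofList [], PySem.Set.ofList ["h:incapsula", "srv:imperva"],
    "Imperva / Incapsula"),
   (PySem.Set.ofList ["h:<script"], PySem.Set.ofList ["h:__nuxt__", "h:__next_data__", "h:ng-version", "h:react-root"],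
    "JS-rendered SPA — server returned shell HTML, real content loads via JS"),
   (PySem.Set.ofList ["empty"], PySem.Set.ofList [],
    "empty response body")]

-- stage 1: Source B's _signals helper
def pvSignals (h srv : String) (headers : List (String × String)) : PySem.Set String :=
  let found : PySem.Set String := PySem.Set.empty
  let found := pvSrvProbes.foldl
    (fun s p => if PySem.Str.isIn p.1 srv then PySem.Set.add s p.2 else s) found
  let found := pvBodyProbes.foldl
    (fun s p => if PySem.Str.isIn p.1 h then PySem.Set.add s p.2 else s) found
  let found := if PySem.Set.contains (PySem.Set.ofList (headers.map (fun kv => PySem.Str.lower kv.1))) "cf-ray" then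
    PySem.Set.add found "hdr:cf-ray" else found
  if PySem.Str.len (PySem.Str.strip h) == 0 then PySem.Set.add found "empty" else found

-- stage 2: evaluate the rules against the signal set
def detect_blockers_py_alt (html : String) (headers : List (String × String)) : String :=
  let h := PySem.Str.lower (PySem.Str.slice html none (some 5000))
  let srv := PySem.Str.lower ((List.lookup "server" headers).getD "")
  let found := pvSignals h srv headers
  let hits := (pvRules.filter (fun r =>
      PySem.Set.issubset r.1 found
        && (r.2.1.isEmpty || !PySem.Set.isdisjoint r.2.1 found))).map (fun r => r.2.2)
  PySem.Str.join "; " hits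

-- ===== PRECONDITION & SPEC =====
def Spec_detect_blockers_py (html : String) (headers : List (String × String)) (out : String) : Prop := out = detect_blockers_py_alt html headers
instance (html : String) (headers : List (String × String)) (out : String) : Decidable (Spec_detect_blockers_py html headers out) := by unfold Spec_detect_blockers_py; infer_instance

-- ===== CLAIM =====
def Claim_equal_detect_blockers_py : Prop := ∀ (html : String) (headers : List (String × String)), Dom_detect_blockers_py html headers → Spec_detect_blockers_py html headers (detect_blockers_py html headers)

-- ===== LEMMAS AND PROOFS =====

-- membership in a conditional-add fold over a probe table
theorem pv_mem_foldl_add_if {α β : Type} [BEq α] [LawfulBEq α]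
    (l : List β) (c : β → Bool) (f : β → α) (s : PySem.Set α) (x : α) :
    x ∈ l.foldl (fun s b => if c b then PySem.Set.add s (f b) else s) s ↔
      x ∈ s ∨ ∃ b ∈ l, c b ∧ x = f b := by
  induction l generalizing s with
  | nil => simp
  | cons b l ih =>
    simp only [List.foldl_cons]
    by_cases hb : c b = true
    · simp only [hb, if_true, ih, PySem.Set.mem_add]
      constructor
      · rintro ((hs | rfl) | ⟨b', hb', hc', rfl⟩)
        · exact Or.inl hs
        · exact Or.inr ⟨b, List.mem_cons_self, hb, rfl⟩
        · exact Or.inr ⟨b', List.mem_cons_of_mem _ hb', hc', rfl⟩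
      · rintro (hs | ⟨b', hb', hc', rfl⟩)
        · exact Or.inl (Or.inl hs)
        · rcases List.mem_cons.mp hb' with rfl | hb''
          · exact Or.inl (Or.inr rfl)
          · exact Or.inr ⟨b', hb'', hc', rfl⟩
    · simp only [hb, if_false, ih]
      constructor
      · rintro (hs | ⟨b', hb', hc', rfl⟩)
        · exact Or.inl hs
        · exact Or.inr ⟨b', List.mem_cons_of_mem _ hb', hc', rfl⟩
      · rintro (hs | ⟨b', hb', hc', rfl⟩)
        · exact Or.inl hs
        · rcases List.mem_cons.mp hb' with rfl | hb''
          · exact absurd hc' hb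
          · exact Or.inr ⟨b', hb'', hc', rfl⟩

-- membership in a conditional add
theorem pv_mem_if_add {α : Type} [BEq α] [LawfulBEq α]
    (b : Bool) (s : PySem.Set α) (y x : α) :
    x ∈ (if b then PySem.Set.add s y else s) ↔ x ∈ s ∨ (b ∧ x = y) := by
  cases b <;> simp [PySem.Set.mem_add]

-- a Bool-false disjointness test is a shared element
theorem pv_isdisjoint_false {α : Type} [BEq α] [LawfulBEq α] (s t : PySem.Set α) :
    PySem.Set.isdisjoint s t = false ↔ ∃ x ∈ s, x ∈ t := by
  rw [Bool.eq_false_iff, Ne]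
  simp [PySem.Set.isdisjoint_iff]

-- which tags the signal set holds
theorem pv_mem_signals (h srv : String) (headers : List (String × String)) (x : String) :
    x ∈ pvSignals h srv headers ↔
      (∃ p ∈ pvSrvProbes, PySem.Str.isIn p.1 srv ∧ x = p.2) ∨
      (∃ p ∈ pvBodyProbes, PySem.Str.isIn p.1 h ∧ x = p.2) ∨
      ((PySem.Set.contains (PySem.Set.ofList (headers.map (fun kv => PySem.Str.lower kv.1))) "cf-ray") ∧ x = "hdr:cf-ray") ∨
      ((PySem.Str.len (PySem.Str.strip h) == 0) ∧ x = "empty") := by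
  unfold pvSignals
  simp only [pv_mem_if_add, pv_mem_foldl_add_if, PySem.Set.empty,
    List.not_mem_nil, false_or, or_assoc]

theorem pv_flag1 (h srv : String) (headers : List (String × String)) :
    (PySem.Set.issubset (PySem.Set.ofList []) (pvSignals h srv headers)
      && ((PySem.Set.ofList ["srv:cloudflare", "hdr:cf-ray"] : PySem.Set String).isEmpty
          || !PySem.Set.isdisjoint (PySem.Set.ofList ["srv:cloudflare", "hdr:cf-ray"]) (pvSignals h srv headers)))
    = (PySem.Str.isIn "cloudflare" srv || PySem.Set.contains (PySem.Set.ofList (headers.map (fun kv => PySem.Str.lower kv.1))) "cf-ray") := by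
  rw [Bool.eq_iff_iff]
  simp [PySem.Set.issubset_iff, pv_isdisjoint_false, pv_mem_signals, pvSrvProbes, pvBodyProbes] <;>
  simp [PySem.Set.ofList_cons, or_assoc]

theorem pv_flag2 (h srv : String) (headers : List (String × String)) :
    (PySem.Set.issubset (PySem.Set.ofList []) (pvSignals h srv headers)
      && ((PySem.Set.ofList ["h:just a moment", "h:checking your browser"] : PySem.Set String).isEmpty
          || !PySem.Set.isdisjoint (PySem.Set.ofList ["h:just a moment", "h:checking your browser"]) (pvSignals h srv headers)))
    = (PySem.Str.isIn "just a moment" h || PySem.Str.isIn "checking your browser" h) := by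
  rw [Bool.eq_iff_iff]
  simp [PySem.Set.issubset_iff, pv_isdisjoint_false, pv_mem_signals, pvSrvProbes, pvBodyProbes] <;>
  simp [PySem.Set.ofList_cons, or_assoc]

theorem pv_flag3 (h srv : String) (headers : List (String × String)) :
    (PySem.Set.issubset (PySem.Set.ofList []) (pvSignals h srv headers)
      && ((PySem.Set.ofList ["h:captcha", "h:g-recaptcha", "h:h-captcha"] : PySem.Set String).isEmpty
          || !PySem.Set.isdisjoint (PySem.Set.ofList ["h:captcha", "h:g-recaptcha", "h:h-captcha"]) (pvSignals h srv headers)))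
    = (PySem.Str.isIn "captcha" h || PySem.Str.isIn "g-recaptcha" h || PySem.Str.isIn "h-captcha" h) := by
  rw [Bool.eq_iff_iff]
  simp [PySem.Set.issubset_iff, pv_isdisjoint_false, pv_mem_signals, pvSrvProbes, pvBodyProbes] <;>
  simp [PySem.Set.ofList_cons, or_assoc]

theorem pv_flag4 (h srv : String) (headers : List (String × String)) :
    (PySem.Set.issubset (PySem.Set.ofList []) (pvSignals h srv headers)
      && ((PySem.Set.ofList ["srv:ddos-guard", "h:ddos-guard"] : PySem.Set String).isEmpty
          || !PySem.Set.isdisjoint (PySem.Set.ofList ["srv:ddos-guard", "h:ddos-guard"]) (pvSignals h srv headers)))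
    = (PySem.Str.isIn "ddos-guard" srv || PySem.Str.isIn "ddos-guard" h) := by
  rw [Bool.eq_iff_iff]
  simp [PySem.Set.issubset_iff, pv_isdisjoint_false, pv_mem_signals, pvSrvProbes, pvBodyProbes] <;>
  simp [PySem.Set.ofList_cons, or_assoc]

theorem pv_flag5 (h srv : String) (headers : List (String × String)) :
    (PySem.Set.issubset (PySem.Set.ofList []) (pvSignals h srv headers)
      && ((PySem.Set.ofList ["h:incapsula", "srv:imperva"] : PySem.Set String).isEmpty
          || !PySem.Set.isdisjoint (PySem.Set.ofList ["h:incapsula", "srv:imperva"]) (pvSignals h srv headers)))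
    = (PySem.Str.isIn "incapsula" h || PySem.Str.isIn "imperva" srv) := by
  rw [Bool.eq_iff_iff]
  simp [PySem.Set.issubset_iff, pv_isdisjoint_false, pv_mem_signals, pvSrvProbes, pvBodyProbes] <;>
  simp [PySem.Set.ofList_cons, or_assoc]

theorem pv_flag6 (h srv : String) (headers : List (String × String)) :
    (PySem.Set.issubset (PySem.Set.ofList ["h:<script"]) (pvSignals h srv headers)
      && ((PySem.Set.ofList ["h:__nuxt__", "h:__next_data__", "h:ng-version", "h:react-root"] : PySem.Set String).isEmpty
          || !PySem.Set.isdisjoint (PySem.Set.ofList ["h:__nuxt__", "h:__next_data__", "h:ng-version", "h:react-root"]) (pvSignals h srv headers)))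
    = (PySem.Str.isIn "<script" h && (PySem.Str.isIn "__nuxt__" h || PySem.Str.isIn "__next_data__" h || PySem.Str.isIn "ng-version" h || PySem.Str.isIn "react-root" h)) := by
  rw [Bool.eq_iff_iff]
  simp [PySem.Set.issubset_iff, pv_isdisjoint_false, pv_mem_signals, pvSrvProbes, pvBodyProbes] <;>
  simp [PySem.Set.ofList_cons, or_assoc]

theorem pv_flag7 (h srv : String) (headers : List (String × String)) :
    (PySem.Set.issubset (PySem.Set.ofList ["empty"]) (pvSignals h srv headers)
      && ((PySem.Set.ofList [] : PySem.Set String).isEmpty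
          || !PySem.Set.isdisjoint (PySem.Set.ofList []) (pvSignals h srv headers)))
    = (PySem.Str.len (PySem.Str.strip h) == 0) := by
  rw [Bool.eq_iff_iff]
  simp [PySem.Set.issubset_iff, pv_isdisjoint_false, pv_mem_signals, pvSrvProbes, pvBodyProbes] <;>
  simp [PySem.Set.ofList_cons, or_assoc]


-- the branch chain equals the rule engine, pointwise in the prepared strings
set_option maxHeartbeats 1000000 in
theorem pv_core (h srv : String) (headers : List (String × String)) :
    (let hits : List String := []
     let hits := if PySem.Str.isIn "cloudflare" srv || PySem.Set.contains (PySem.Set.ofList (headers.map (fun kv => PySem.Str.lower kv.1))) "cf-ray" then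
       hits ++ ["Cloudflare (likely JS challenge / Turnstile)"] else hits
     let hits := if PySem.Str.isIn "just a moment" h || PySem.Str.isIn "checking your browser" h then
       hits ++ ["Cloudflare interstitial detected in body"] else hits
     let hits := if PySem.Str.isIn "captcha" h || PySem.Str.isIn "g-recaptcha" h || PySem.Str.isIn "h-captcha" h then
       hits ++ ["CAPTCHA challenge"] else hits
     let hits := if PySem.Str.isIn "ddos-guard" srv || PySem.Str.isIn "ddos-guard" h then
       hits ++ ["DDoS-Guard"] else hits
     let hits := if PySem.Str.isIn "incapsula" h || PySem.Str.isIn "imperva" srv then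
       hits ++ ["Imperva / Incapsula"] else hits
     let hits := if PySem.Str.isIn "<script" h && (PySem.Str.isIn "__nuxt__" h || PySem.Str.isIn "__next_data__" h || PySem.Str.isIn "ng-version" h || PySem.Str.isIn "react-root" h) then
       hits ++ ["JS-rendered SPA — server returned shell HTML, real content loads via JS"] else hits
     let hits := if PySem.Str.len (PySem.Str.strip h) == 0 then
       hits ++ ["empty response body"] else hits
     PySem.Str.join "; " hits)
    = (let found := pvSignals h srv headers
       let hits := (pvRules.filter (fun r =>
           PySem.Set.issubset r.1 found
             && (r.2.1.isEmpty || !PySem.Set.isdisjoint r.2.1 found))).map (fun r => r.2.2)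
       PySem.Str.join "; " hits) := by
  simp only [pvRules, List.filter_cons, List.filter_nil,
    pv_flag1, pv_flag2, pv_flag3, pv_flag4, pv_flag5, pv_flag6, pv_flag7]
  generalize (PySem.Str.isIn "cloudflare" srv || PySem.Set.contains (PySem.Set.ofList (headers.map (fun kv => PySem.Str.lower kv.1))) "cf-ray" : Bool) = c1
  generalize (PySem.Str.isIn "just a moment" h || PySem.Str.isIn "checking your browser" h : Bool) = c2
  generalize (PySem.Str.isIn "captcha" h || PySem.Str.isIn "g-recaptcha" h || PySem.Str.isIn "h-captcha" h : Bool) = c3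
  generalize (PySem.Str.isIn "ddos-guard" srv || PySem.Str.isIn "ddos-guard" h : Bool) = c4
  generalize (PySem.Str.isIn "incapsula" h || PySem.Str.isIn "imperva" srv : Bool) = c5
  generalize (PySem.Str.isIn "<script" h && (PySem.Str.isIn "__nuxt__" h || PySem.Str.isIn "__next_data__" h || PySem.Str.isIn "ng-version" h || PySem.Str.isIn "react-root" h) : Bool) = c6
  generalize (PySem.Str.len (PySem.Str.strip h) == 0 : Bool) = c7
  cases c1 <;> cases c2 <;> cases c3 <;> cases c4 <;> cases c5 <;> cases c6 <;> cases c7 <;> rfl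

-- ===== VERDICT =====
theorem detect_blockers_py_spec : Claim_equal_detect_blockers_py := by
  intro html headers _
  exact pv_core (PySem.Str.lower (PySem.Str.slice html none (some 5000)))
    (PySem.Str.lower ((List.lookup "server" headers).getD "")) headers
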